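-- pv_equiv track=rewrite | github.com/pypi-data/pypi-mirror-404 | packages/oscura/oscura-0.8.0-py3-none-any.whl/oscura/inference/alignment.py | _find_variable_simple
-- ===== SOURCE A (Python) =====
-- def _find_variable_simple(aligned_a: list[int], aligned_b: list[int]) -> list[tuple[int, int]]:
--     """Find variable regions in pairwise alignment.
--
--     Args:
--         aligned_a: First aligned sequence
--         aligned_b: Second aligned sequence
--
--     Returns:
--         List of (start, end) tuples
--     """
--     regions = []
--     start = None
--
--     for i, (a, b) in enumerate(zip(aligned_a, aligned_b, strict=True)):
--         if a != b:
--             if start is None: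
--                 start = i
--         else:
--             if start is not None:
--                 if i - start >= 2:  # Min length 2
--                     regions.append((start, i))
--                 start = None
--
--     # Handle region at end
--     if start is not None and len(aligned_a) - start >= 2:
--         regions.append((start, len(aligned_a)))
--
--     return regions
-- ===== SOURCE B (Python) =====
-- from itertools import groupby
--
--
-- def _find_variable_simple(aligned_a: list[int], aligned_b: list[int]) -> list[tuple[int, int]]:
--     """Find variable regions (runs of differences of length >= 2) in a pairwise alignment."""
--     diffs = [a != b for a, b in zip(aligned_a, aligned_b, strict=True)]
--     regions = []
--     offset = 0
--     for key, grp in groupby(diffs):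
--         length = sum(1 for _ in grp)
--         if key and length >= 2:
--             regions.append((offset, offset + length))
--         offset += length
--     return regions
-- ===== Notes on version B (the rewrite author's own statement) =====
-- stated objective: idiomatic
-- what changed: Replaced the explicit start/None state machine with its separate end-of-sequence fixup by a boolean difference mask scanned run-by-run with itertools.groupby, keeping a running offset.
import Mathlib
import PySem

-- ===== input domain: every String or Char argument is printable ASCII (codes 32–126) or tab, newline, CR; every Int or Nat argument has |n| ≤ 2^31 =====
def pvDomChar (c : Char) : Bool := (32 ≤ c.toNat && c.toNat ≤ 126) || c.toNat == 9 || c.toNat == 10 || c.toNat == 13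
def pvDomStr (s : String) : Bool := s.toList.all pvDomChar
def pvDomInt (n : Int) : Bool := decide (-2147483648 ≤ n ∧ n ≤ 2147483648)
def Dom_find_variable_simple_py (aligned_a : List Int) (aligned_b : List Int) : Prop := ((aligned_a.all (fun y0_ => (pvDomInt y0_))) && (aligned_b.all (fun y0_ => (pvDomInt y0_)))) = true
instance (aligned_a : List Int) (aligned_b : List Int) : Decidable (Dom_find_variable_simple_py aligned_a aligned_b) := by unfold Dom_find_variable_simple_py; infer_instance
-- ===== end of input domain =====

-- B replaces A's start/None state machine (with its separate end-of-sequence fixup) by a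
-- boolean difference mask scanned run-by-run (groupby) with a running offset; same O(n) cost.

-- ===== PORT A =====
-- the for-loop over enumerate(zip(...)): state = (regions, start), i the running index
def pvLoopA : List (Int × Int) → Int → List (Int × Int) → Option Int → List (Int × Int) × Option Int
  | [], _, regions, start => (regions, start)
  | (a, b) :: rest, i, regions, start =>
    if a ≠ b then
      pvLoopA rest (i + 1) regions (if start = none then some i else start)
    else
      match start with
      | some s => pvLoopA rest (i + 1) (if i - s ≥ 2 then regions ++ [(s, i)] else regions) none
      | none => pvLoopA rest (i + 1) regions none

-- the trailing "Handle region at end" block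
def pvFinishA (st : List (Int × Int) × Option Int) (n : Int) : List (Int × Int) :=
  match st.2 with
  | some s => if n - s ≥ 2 then st.1 ++ [(s, n)] else st.1
  | none => st.1

def find_variable_simple_py (aligned_a : List Int) (aligned_b : List Int) : List (Int × Int) :=
  pvFinishA (pvLoopA (aligned_a.zip aligned_b) 0 [] none) (aligned_a.length : Int)

-- ===== PORT B =====
-- length of the leading run equal to k, and the remainder (= one groupby group)
def pvTakeRun (k : Bool) : List Bool → Nat × List Bool
  | [] => (0, [])
  | x :: xs => if x = k then ((pvTakeRun k xs).1 + 1, (pvTakeRun k xs).2) else (0, x :: xs)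

theorem pvTakeRun_len (k : Bool) : ∀ xs : List Bool, (pvTakeRun k xs).2.length ≤ xs.length := by
  intro xs
  induction xs with
  | nil => simp [pvTakeRun]
  | cons x t ih => by_cases h : x = k <;> simp [pvTakeRun, h] <;> omega

-- the groupby loop over the difference mask, offset accumulated
def pvGroups : List Bool → Int → List (Int × Int)
  | [], _ => []
  | x :: xs, off =>
    let n := (pvTakeRun x xs).1
    let len : Int := (n : Int) + 1
    (if x = true ∧ len ≥ 2 then [(off, off + len)] else []) ++ pvGroups (pvTakeRun x xs).2 (off + len)
termination_by xs _ => xs.length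
decreasing_by
  have := pvTakeRun_len x xs
  simp at *
  omega

def find_variable_simple_py_alt (aligned_a : List Int) (aligned_b : List Int) : List (Int × Int) :=
  pvGroups (List.zipWith (fun a b => a != b) aligned_a aligned_b) 0

-- ===== PRECONDITION & SPEC =====
-- Pre_ excludes unequal-length inputs, on which A (zip strict=True) raises ValueError.
def Pre_find_variable_simple_py (aligned_a : List Int) (aligned_b : List Int) : Prop :=
  aligned_a.length = aligned_b.length
instance (aligned_a : List Int) (aligned_b : List Int) : Decidable (Pre_find_variable_simple_py aligned_a aligned_b) := by unfold Pre_find_variable_simple_py; infer_instance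

def pvWitness_find_variable_simple_py : List Int × List Int := ([1, 2, 3, 4], [1, 5, 6, 4])

def Spec_find_variable_simple_py (aligned_a : List Int) (aligned_b : List Int) (out : List (Int × Int)) : Prop := out = find_variable_simple_py_alt aligned_a aligned_b
instance (aligned_a : List Int) (aligned_b : List Int) (out : List (Int × Int)) : Decidable (Spec_find_variable_simple_py aligned_a aligned_b out) := by unfold Spec_find_variable_simple_py; infer_instance

-- ===== CLAIM (what is proved, stated in full; the proofs are below) =====
def Claim_equal_find_variable_simple_py : Prop := ∀ (aligned_a : List Int) (aligned_b : List Int), Dom_find_variable_simple_py aligned_a aligned_b → Pre_find_variable_simple_py aligned_a aligned_b → Spec_find_variable_simple_py aligned_a aligned_b (find_variable_simple_py aligned_a aligned_b)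

-- ===== LEMMAS AND PROOFS =====

-- A's loop only looks at whether the two components differ: abstract to the mask
def pvLoopD : List Bool → Int → List (Int × Int) → Option Int → List (Int × Int) × Option Int
  | [], _, regions, start => (regions, start)
  | d :: rest, i, regions, start =>
    if d = true then
      pvLoopD rest (i + 1) regions (if start = none then some i else start)
    else
      match start with
      | some s => pvLoopD rest (i + 1) (if i - s ≥ 2 then regions ++ [(s, i)] else regions) none
      | none => pvLoopD rest (i + 1) regions none

theorem pvLoopA_eq_loopD : ∀ (ps : List (Int × Int)) (i : Int) (regions : List (Int × Int)) (start : Option Int),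
    pvLoopA ps i regions start = pvLoopD (ps.map (fun p => p.1 != p.2)) i regions start := by
  intro ps
  induction ps with
  | nil => intro i r s; rfl
  | cons p t ih =>
    intro i r s
    obtain ⟨a, b⟩ := p
    by_cases h : a = b
    · cases s <;> simp [pvLoopA, pvLoopD, h, ih]
    · simp [pvLoopA, pvLoopD, h, ih]

theorem pvGroups_false_cons : ∀ (rest : List Bool) (i : Int),
    pvGroups (false :: rest) i = pvGroups rest (i + 1) := by
  intro rest i
  cases rest with
  | nil => simp [pvGroups, pvTakeRun]
  | cons x t =>
    cases x
    · simp only [pvGroups, pvTakeRun, reduceIte]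
      simp only [Bool.false_eq_true, false_and, if_false, List.nil_append]
      congr 1
      push_cast
      ring
    · simp [pvGroups, pvTakeRun]

-- joint invariant for A's loop: (1) start = none, (2) start = some (i - m), a run of m trues open
theorem pvMain : ∀ ds : List Bool,
    (∀ (i : Int) (regions : List (Int × Int)),
      pvFinishA (pvLoopD ds i regions none) (i + ds.length) = regions ++ pvGroups ds i) ∧
    (∀ (i : Int) (regions : List (Int × Int)) (m : Int), 1 ≤ m →
      pvFinishA (pvLoopD ds i regions (some (i - m))) (i + ds.length) =
        regions ++ (if 2 ≤ m + (pvTakeRun true ds).1 then [(i - m, i + (pvTakeRun true ds).1)] else [])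
          ++ pvGroups (pvTakeRun true ds).2 (i + (pvTakeRun true ds).1)) := by
  intro ds
  induction ds with
  | nil =>
    constructor
    · intro i r; simp [pvLoopD, pvFinishA, pvGroups]
    · intro i r m hm
      simp only [pvLoopD, pvFinishA, pvTakeRun, pvGroups]
      simp only [List.length_nil, Int.natCast_zero, add_zero]
      have h2 : i - (i - m) = m := by ring
      rw [h2]
      split_ifs with h <;> simp <;> omega
  | cons d rest ih =>
    obtain ⟨ih1, ih2⟩ := ih
    constructor
    · intro i r
      cases d
      · -- false: state stays none
        simp only [pvLoopD, Bool.false_eq_true, if_false, List.length_cons]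
        rw [show (i + ((rest.length + 1 : Nat) : Int)) = (i + 1) + (rest.length : Int) by push_cast; ring]
        rw [ih1 (i + 1) r, pvGroups_false_cons]
      · -- true: open a run of length 1 at i = (i+1) - 1
        simp only [pvLoopD, reduceIte, List.length_cons]
        rw [show (i + ((rest.length + 1 : Nat) : Int)) = (i + 1) + (rest.length : Int) by push_cast; ring]
        have h := ih2 (i + 1) r 1 (by omega)
        rw [show (i + 1 - 1 : Int) = i by ring] at h
        rw [h]
        simp only [pvGroups, pvTakeRun, reduceIte, true_and, ge_iff_le]
        rw [show ((i : Int) + 1 + ((pvTakeRun true rest).1 : Int)) = i + (((pvTakeRun true rest).1 : Int) + 1) by ring]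
        split_ifs with ha hb <;> first | (exfalso; omega) | simp
    · intro i r m hm
      cases d
      · -- false: close the open run of length m
        simp only [pvLoopD, Bool.false_eq_true, if_false, List.length_cons]
        rw [show i - (i - m) = m from by ring]
        rw [show (i + ((rest.length + 1 : Nat) : Int)) = (i + 1) + (rest.length : Int) by push_cast; ring]
        rw [ih1 (i + 1) (if m ≥ 2 then r ++ [(i - m, i)] else r)]
        simp only [pvTakeRun, Bool.false_eq_true, if_false, Int.natCast_zero, add_zero]
        rw [pvGroups_false_cons]
        split_ifs with h1 h2 <;> first | (exfalso; omega) | simp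
      · -- true: run grows to m + 1
        simp only [pvLoopD, reduceIte, List.length_cons]
        rw [if_neg (by simp : ¬ (some (i - m) = none))]
        rw [show (i + ((rest.length + 1 : Nat) : Int)) = (i + 1) + (rest.length : Int) by push_cast; ring]
        have h := ih2 (i + 1) r (m + 1) (by omega)
        rw [show (i + 1 - (m + 1) : Int) = i - m by ring] at h
        rw [h]
        simp only [pvTakeRun, reduceIte, true_and, ge_iff_le]
        push_cast
        rw [show ((i : Int) + 1 + ((pvTakeRun true rest).1 : Int)) = i + (((pvTakeRun true rest).1 : Int) + 1) by ring]
        split_ifs with h1 h2 <;> first | (exfalso; omega) | rfl | simp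

theorem zip_map_bne (a b : List Int) :
    (a.zip b).map (fun p => p.1 != p.2) = List.zipWith (fun x y => x != y) a b := by
  induction a generalizing b with
  | nil => simp
  | cons x t ih => cases b <;> simp [ih]

-- ===== VERDICT (by name: the statement is the Claim_ definition above) =====
theorem find_variable_simple_py_spec : Claim_equal_find_variable_simple_py := by
  intro a b _ hpre
  unfold Spec_find_variable_simple_py find_variable_simple_py find_variable_simple_py_alt
  rw [pvLoopA_eq_loopD, zip_map_bne]
  have hab : a.length = b.length := hpre
  have hlen : (List.zipWith (fun x y => x != y) a b).length = a.length := by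
    rw [List.length_zipWith, hab, min_self]
  have := (pvMain (List.zipWith (fun x y => x != y) a b)).1 0 []
  rw [hlen] at this
  simpa using this
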